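-- pv_equiv track=rewrite | github.com/benreynwar/plogram | keys.py | keys_to_number
-- ===== SOURCE A (Python) =====
-- def keys_to_number(keys):
--     assert(len(keys) == 4)
--     m = 1
--     t = 0
--     for key in keys:
--         if key:
--             t += m
--         m *= 2
--     return t
-- ===== SOURCE B (Python) =====
-- def keys_to_number(keys):
--     assert(len(keys) == 4)
--     k0, k1, k2, k3 = keys
--     return (8 if k3 else 0) | (4 if k2 else 0) | (2 if k1 else 0) | (1 if k0 else 0)
-- ===== Notes on version B (the rewrite author's own statement) =====
-- stated objective: simpler
-- what changed: Eliminates the loop and the running bit-weight entirely: unpacks the four keys and ORs fixed bit masks 8|4|2|1 in a closed form.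
import Mathlib
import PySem

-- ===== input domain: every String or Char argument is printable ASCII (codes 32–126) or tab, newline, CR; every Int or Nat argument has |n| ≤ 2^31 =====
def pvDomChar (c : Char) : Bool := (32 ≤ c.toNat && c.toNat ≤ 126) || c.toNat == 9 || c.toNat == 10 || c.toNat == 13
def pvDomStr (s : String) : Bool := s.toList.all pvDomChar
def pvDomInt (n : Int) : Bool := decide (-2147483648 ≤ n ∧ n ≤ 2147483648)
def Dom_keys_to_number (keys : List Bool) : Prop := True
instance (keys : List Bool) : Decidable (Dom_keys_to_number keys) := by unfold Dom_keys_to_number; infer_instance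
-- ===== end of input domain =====

-- B removes the loop and bit-weight accumulator: it unpacks the 4 keys and ORs fixed masks (simpler).

-- ===== PORT A =====
-- loop state (m, t); if key then t += m; m *= 2
def keys_to_number (keys : List Bool) : Int :=
  (keys.foldl (fun (st : Int × Int) key =>
    (st.1 * 2, if key then st.2 + st.1 else st.2)) (1, 0)).2

-- ===== PORT B =====
-- tuple unpack of the 4 keys; closed-form bitwise OR of fixed masks
-- (the unpack raises for other lengths in Python; those inputs are outside Pre_, the port returns 0 there)
def keys_to_number_alt (keys : List Bool) : Int :=
  match keys with
  | [k0, k1, k2, k3] =>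
      Int.lor (Int.lor (Int.lor (if k3 then (8 : Int) else 0) (if k2 then 4 else 0))
        (if k1 then 2 else 0)) (if k0 then 1 else 0)
  | _ => 0

-- ===== PRECONDITION & SPEC =====
-- A asserts len(keys) == 4; inputs of other length raise AssertionError.
def Pre_keys_to_number (keys : List Bool) : Prop := keys.length = 4
instance (keys : List Bool) : Decidable (Pre_keys_to_number keys) := by unfold Pre_keys_to_number; infer_instance
def pvWitness_keys_to_number : List Bool := [true, false, true, true]

def Spec_keys_to_number (keys : List Bool) (out : Int) : Prop := out = keys_to_number_alt keys
instance (keys : List Bool) (out : Int) : Decidable (Spec_keys_to_number keys out) := by unfold Spec_keys_to_number; infer_instance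

-- ===== CLAIM (what is proved, stated in full; the proofs are below) =====
def Claim_equal_keys_to_number : Prop := ∀ (keys : List Bool), Dom_keys_to_number keys → Pre_keys_to_number keys → Spec_keys_to_number keys (keys_to_number keys)

-- ===== LEMMAS AND PROOFS =====
theorem keys_to_number_len4 (a b c d : Bool) :
    keys_to_number [a, b, c, d] = keys_to_number_alt [a, b, c, d] := by
  cases a <;> cases b <;> cases c <;> cases d <;> simp [keys_to_number, keys_to_number_alt, Int.lor]

-- ===== VERDICT (by name: the statement is the Claim_ definition above) =====
theorem keys_to_number_spec : Claim_equal_keys_to_number := by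
  intro keys _ hpre
  match keys, hpre with
  | [a, b, c, d], _ => exact keys_to_number_len4 a b c d
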